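-- pv_equiv track=rewrite | github.com/DonghanPark/codetree-TILs | 250517/선두를 지켜라 3/keep-the-lead-3.py | simul_dist
-- ===== SOURCE A (Python) =====
-- def simul_dist(info: list[tuple[int, int]]) -> list[int]:
--     dist_info = []
--     curr_dist = 0
--
--     for v, t in info:
--         for _ in range(t):
--             curr_dist += v
--             dist_info.append(curr_dist)
--
--     return dist_info
-- ===== SOURCE B (Python) =====
-- def simul_dist(info):
--     # Recursive, segment-wise closed form: the k-th output inside a segment
--     # (v, t) is base + v*k, computed by multiplication; no per-step running sum.
--     def go(base, rest):
--         if not rest: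
--             return []
--         (v, t), tail = rest[0], rest[1:]
--         n = max(t, 0)
--         return [base + v * k for k in range(1, n + 1)] + go(base + v * n, tail)
--     return go(0, info)
-- ===== Notes on version B (the rewrite author's own statement) =====
-- stated objective: alternative
-- what changed: A builds each element by repeated addition in an interleaved nested loop; B recurses over the segments and computes each segment's block directly by the closed form base + v*k (multiplication), carrying only the segment base across the recursion.
import Mathlib
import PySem

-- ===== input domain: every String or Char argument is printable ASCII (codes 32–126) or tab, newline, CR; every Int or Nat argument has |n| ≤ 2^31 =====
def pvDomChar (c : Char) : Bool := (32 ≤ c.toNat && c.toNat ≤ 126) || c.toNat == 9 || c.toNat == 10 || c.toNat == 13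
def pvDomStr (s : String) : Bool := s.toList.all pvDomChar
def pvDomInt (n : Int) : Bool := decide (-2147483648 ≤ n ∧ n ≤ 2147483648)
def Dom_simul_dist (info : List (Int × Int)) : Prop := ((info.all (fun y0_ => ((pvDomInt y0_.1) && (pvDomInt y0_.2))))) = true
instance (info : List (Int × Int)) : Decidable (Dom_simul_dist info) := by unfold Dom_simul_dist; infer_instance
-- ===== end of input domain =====

-- B replaces A's element-by-element repeated addition with a recursion over segments
-- that emits each block by the closed form base + v*k — same cost, different algorithm.

-- ===== PORT A =====
-- for v, t in info: for _ in range(t): curr_dist += v; dist_info.append(curr_dist)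
def simul_dist (info : List (Int × Int)) : List Int :=
  (info.foldl
    (fun (st : List Int × Int) vt =>
      (PySem.List.pyRange 0 vt.2 1).foldl
        (fun (st2 : List Int × Int) _ => (st2.1 ++ [st2.2 + vt.1], st2.2 + vt.1))
        st)
    ([], 0)).1

-- ===== PORT B =====
-- def go(base, rest): … [base + v*k for k in range(1, n+1)] + go(base + v*n, tail)
def simul_dist_alt_go (base : Int) : List (Int × Int) → List Int
  | [] => []
  | vt :: tail =>
      let n : Int := max vt.2 0
      ((PySem.List.pyRange 1 (n + 1) 1).map (fun k => base + vt.1 * k))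
        ++ simul_dist_alt_go (base + vt.1 * n) tail

def simul_dist_alt (info : List (Int × Int)) : List Int :=
  simul_dist_alt_go 0 info

-- ===== PRECONDITION & SPEC =====
def Spec_simul_dist (info : List (Int × Int)) (out : List Int) : Prop := out = simul_dist_alt info
instance (info : List (Int × Int)) (out : List Int) : Decidable (Spec_simul_dist info out) := by unfold Spec_simul_dist; infer_instance

-- ===== CLAIM =====
def Claim_equal_simul_dist : Prop := ∀ (info : List (Int × Int)), Dom_simul_dist info → Spec_simul_dist info (simul_dist info)

-- ===== LEMMAS AND PROOFS =====

/-- running prefix sums of `l` starting from accumulated value `c` (characterises A). -/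
def accAux (c : Int) : List Int → List Int
  | [] => []
  | x :: xs => (c + x) :: accAux (c + x) xs

theorem accAux_append (c : Int) (xs ys : List Int) :
    accAux c (xs ++ ys) = accAux c xs ++ accAux (c + xs.sum) ys := by
  induction xs generalizing c with
  | nil => simp [accAux]
  | cons x xs ih => simp [accAux, ih, add_assoc]

/-- A's inner loop over any list (element ignored) appends prefix sums of a constant block. -/
theorem innerA {α : Type} (v : Int) (l : List α) (acc : List Int) (c : Int) :
    l.foldl (fun (st : List Int × Int) _ => (st.1 ++ [st.2 + v], st.2 + v)) (acc, c)
      = (acc ++ accAux c (List.replicate l.length v), c + l.length * v) := by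
  induction l generalizing acc c with
  | nil => simp [accAux]
  | cons a l ih =>
      simp only [List.foldl_cons, List.length_cons, ih, List.replicate_succ, accAux]
      refine Prod.ext (by simp) (by push_cast; ring)

/-- A's whole fold produces the prefix sums of the expanded increment stream. -/
theorem outerA (info : List (Int × Int)) (acc : List Int) (c : Int) :
    info.foldl
      (fun (st : List Int × Int) vt =>
        (PySem.List.pyRange 0 vt.2 1).foldl
          (fun (st2 : List Int × Int) _ => (st2.1 ++ [st2.2 + vt.1], st2.2 + vt.1))
          st)
      (acc, c)
      = (acc ++ accAux c (info.flatMap (fun vt => List.replicate vt.2.toNat vt.1)),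
         c + (info.flatMap (fun vt => List.replicate vt.2.toNat vt.1)).sum) := by
  induction info generalizing acc c with
  | nil => simp [accAux]
  | cons vt info ih =>
      simp only [List.foldl_cons, innerA vt.1 (PySem.List.pyRange 0 vt.2 1) acc c, ih]
      have hlen : (PySem.List.pyRange 0 vt.2 1).length = vt.2.toNat := by
        simp [PySem.List.length_pyRange_one]
      rw [hlen]
      simp [accAux_append, List.sum_replicate, add_assoc]

/-- the prefix sums of a constant block ARE the closed-form block. -/
theorem accAux_replicate (c v : Int) (m : Nat) :
    accAux c (List.replicate m v) = (List.range m).map (fun (k : Nat) => c + v * ((k : Int) + 1)) := by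
  induction m generalizing c with
  | zero => simp [accAux]
  | succ m ih =>
      rw [List.replicate_succ, List.range_succ_eq_map, List.map_cons, List.map_map]
      simp only [accAux, ih]
      refine congrArg₂ List.cons (by push_cast; ring) ?_
      refine List.map_congr_left (fun k _ => ?_)
      simp only [Function.comp]
      push_cast; ring

/-- B's recursion computes the prefix sums of the expanded increment stream. -/
theorem goB (info : List (Int × Int)) (base : Int) :
    simul_dist_alt_go base info
      = accAux base (info.flatMap (fun vt => List.replicate vt.2.toNat vt.1)) := by
  induction info generalizing base with
  | nil => simp [simul_dist_alt_go, accAux]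
  | cons vt info ih =>
      have hmax : max vt.2 0 = (vt.2.toNat : Int) := (Int.toNat_eq_max vt.2).symm
      simp only [simul_dist_alt_go, ih, List.flatMap_cons, accAux_append,
        List.sum_replicate, hmax, accAux_replicate, PySem.List.pyRange_one]
      have hn : ((vt.2.toNat : Int) + 1 - 1).toNat = vt.2.toNat := by omega
      rw [hn, List.map_map]
      refine congrArg₂ (· ++ ·) ?_ ?_
      · refine List.map_congr_left (fun k _ => ?_)
        simp only [Function.comp]; ring
      · congr 1
        simp only [nsmul_eq_mul]
        ring

-- ===== VERDICT =====
theorem simul_dist_spec : Claim_equal_simul_dist := by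
  intro info _
  unfold Spec_simul_dist simul_dist simul_dist_alt
  rw [outerA, goB]
  simp only [List.nil_append]
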